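-- pv_equiv track=rewrite | github.com/cirosantilli/project-euler-solvers | solvers/484.py | arithmetic_derivative
-- ===== SOURCE A (Python) =====
-- def arithmetic_derivative(n: int) -> int:
--     """
--     Arithmetic derivative n' for small n (trial division factorization).
--     Used for asserts only.
--     """
--     if n <= 1:
--         return 0
--     m = n
--     res = 0
--
--     # factor 2
--     if (m & 1) == 0:
--         a = 0
--         while (m & 1) == 0:
--             m >>= 1
--             a += 1
--         res += a * (n // 2)
--
--     p = 3
--     while p * p <= m:
--         if m % p == 0:
--             a = 0
--             while m % p == 0:
--                 m //= p
--                 a += 1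
--             res += a * (n // p)
--         p += 2
--
--     if m > 1:
--         # remaining prime factor with exponent 1
--         res += n // m
--     return res
-- ===== SOURCE B (Python) =====
-- def arithmetic_derivative(n: int) -> int:
--     """Arithmetic derivative via the Leibniz rule: (p*q)' = q + p*q',
--     unfolding one smallest prime factor at a time."""
--     if n <= 1:
--         return 0
--     # smallest prime factor of n by trial division
--     if n % 2 == 0:
--         p = 2
--     else:
--         p = 3
--         while p * p <= n and n % p != 0:
--             p += 2
--         if n < p * p:
--             p = n  # n itself is prime
--     q = n // p
--     return q + p * arithmetic_derivative(q)
-- ===== Notes on version B (the rewrite author's own statement) =====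
-- stated objective: alternative
-- what changed: Replaces the single-pass factor-accumulation loop (strip each prime power, add exponent*(n//p)) by a recursive Leibniz product rule: find the smallest prime factor p, return n//p + p * arithmetic_derivative(n//p).
import Mathlib
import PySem

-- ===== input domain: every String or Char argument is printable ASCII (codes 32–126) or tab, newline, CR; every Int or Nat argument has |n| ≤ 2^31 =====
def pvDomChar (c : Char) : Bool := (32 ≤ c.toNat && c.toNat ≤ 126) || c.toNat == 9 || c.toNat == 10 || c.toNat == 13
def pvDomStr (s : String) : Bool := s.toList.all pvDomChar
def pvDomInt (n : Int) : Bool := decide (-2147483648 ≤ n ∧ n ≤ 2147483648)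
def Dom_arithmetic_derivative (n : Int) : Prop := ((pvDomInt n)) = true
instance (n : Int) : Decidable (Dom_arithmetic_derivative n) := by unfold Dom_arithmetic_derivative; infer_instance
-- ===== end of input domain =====

-- ===== PORT A =====
-- A's inner loop 'while m % p == 0: m //= p; a += 1', returning (final m, count a).
-- Structural recursion on a fuel argument; the wrapper passes fuel that always suffices
-- (the loop variable is positive and strictly decreases), so the port computes exactly A's loop.
def pvStripF : Nat → Int → Int → Int × Int
  | 0, m, _ => (m, 0)
  | fuel + 1, m, p =>
    if 0 < m ∧ 1 < p ∧ PySem.Int.mod m p = 0 then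
      let r := pvStripF fuel (PySem.Int.floordiv m p) p
      (r.1, r.2 + 1)
    else (m, 0)

def pvStrip (m p : Int) : Int × Int := pvStripF m.toNat m p

-- A's factor-2 loop 'while (m & 1) == 0: m >>= 1; a += 1' (same fuel pattern)
def pvStrip2F : Nat → Int → Int × Int
  | 0, m => (m, 0)
  | fuel + 1, m =>
    if 0 < m ∧ PySem.Int.band m 1 = 0 then
      let r := pvStrip2F fuel (m >>> (1:Nat))
      (r.1, r.2 + 1)
    else (m, 0)

def pvStrip2 (m : Int) : Int × Int := pvStrip2F m.toNat m

-- A's 'p = 3; while p*p <= m: …; p += 2' loop, carrying (m, res) (same fuel pattern)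
def pvOddF : Nat → Int → Int → Int → Int → Int × Int
  | 0, _, m, _, res => (m, res)
  | fuel + 1, n, m, p, res =>
    if 2 ≤ p ∧ p * p ≤ m then
      if PySem.Int.mod m p = 0 then
        let r := pvStrip m p
        pvOddF fuel n r.1 (p + 2) (res + r.2 * PySem.Int.floordiv n p)
      else
        pvOddF fuel n m (p + 2) res
    else (m, res)

def pvOdd (n m p res : Int) : Int × Int := pvOddF (m + 2 - p).toNat n m p res

def arithmetic_derivative (n : Int) : Int :=
  if n ≤ 1 then 0
  else
    let m := n
    let res : Int := 0
    let s2 := if PySem.Int.band m 1 = 0 then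
                let r := pvStrip2 m
                (r.1, res + r.2 * PySem.Int.floordiv n 2)
              else (m, res)
    let s3 := pvOdd n s2.1 3 s2.2
    if 1 < s3.1 then s3.2 + PySem.Int.floordiv n s3.1 else s3.2

-- ===== PORT B =====
-- B's 'while p*p <= n and n % p != 0: p += 2' (same fuel pattern; B starts at p = 3)
def pvSpfOddF : Nat → Int → Int → Int
  | 0, _, p => p
  | fuel + 1, n, p =>
    if 2 ≤ p ∧ p * p ≤ n ∧ PySem.Int.mod n p ≠ 0 then pvSpfOddF fuel n (p + 2)
    else p

def pvSpfOdd (n p : Int) : Int := pvSpfOddF (n + 2 - p).toNat n p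

-- B's recursive Leibniz rule: n' = q + p * q' with p the smallest prime factor, q = n // p
def pvAltF : Nat → Int → Int
  | 0, _ => 0
  | fuel + 1, n =>
    if n ≤ 1 then 0
    else
      let p := if PySem.Int.mod n 2 = 0 then 2
               else
                 let p0 := pvSpfOdd n 3
                 if n < p0 * p0 then n else p0
      let q := PySem.Int.floordiv n p
      q + p * pvAltF fuel q

def arithmetic_derivative_alt (n : Int) : Int := pvAltF n.toNat n

-- ===== PRECONDITION & SPEC =====
def Spec_arithmetic_derivative (n : Int) (out : Int) : Prop := out = arithmetic_derivative_alt n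
instance (n : Int) (out : Int) : Decidable (Spec_arithmetic_derivative n out) := by unfold Spec_arithmetic_derivative; infer_instance

-- ===== CLAIM (what is proved, stated in full; the proofs are below) =====
def Claim_equal_arithmetic_derivative : Prop := ∀ (n : Int), Dom_arithmetic_derivative n → Spec_arithmetic_derivative n (arithmetic_derivative n)

-- ===== LEMMAS AND PROOFS =====

-- arithmetic facts used to show the wrappers pass enough fuel
theorem pvFloorLt (n p : Int) (hn : 0 < n) (hp : 1 < p) :
    (PySem.Int.floordiv n p).toNat < n.toNat := by
  rw [PySem.Int.floordiv_eq_ediv_of_pos (by omega)]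
  have h1 : n / p < n := by apply Int.ediv_lt_of_lt_mul <;> nlinarith
  have h2 : 0 ≤ n / p := Int.ediv_nonneg (by omega) (by omega)
  omega

-- the fuel is irrelevant once it dominates the loop measure, giving each wrapper its
-- one-step unfolding equation in exactly the Python loop's shape
theorem pvStripF_irrel :
    ∀ (f g : Nat) (m p : Int), m.toNat ≤ f → m.toNat ≤ g →
      pvStripF f m p = pvStripF g m p := by
  intro f
  induction f with
  | zero =>
    intro g m p hf _
    cases g with
    | zero => rfl
    | succ g => rw [pvStripF, pvStripF, if_neg (by omega)]
  | succ f ih =>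
    intro g m p hf hg
    cases g with
    | zero => rw [pvStripF, pvStripF, if_neg (by omega)]
    | succ g =>
      rw [pvStripF, pvStripF]
      by_cases h : 0 < m ∧ 1 < p ∧ PySem.Int.mod m p = 0
      · rw [if_pos h, if_pos h]
        have hlt := pvFloorLt m p h.1 h.2.1
        rw [ih g (PySem.Int.floordiv m p) p (by omega) (by omega)]
      · rw [if_neg h, if_neg h]

theorem pvStrip_eq (m p : Int) :
    pvStrip m p =
      if 0 < m ∧ 1 < p ∧ PySem.Int.mod m p = 0 then
        ((pvStrip (PySem.Int.floordiv m p) p).1, (pvStrip (PySem.Int.floordiv m p) p).2 + 1)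
      else (m, 0) := by
  rw [pvStrip, pvStrip]
  by_cases h : 0 < m ∧ 1 < p ∧ PySem.Int.mod m p = 0
  · have hlt := pvFloorLt m p h.1 h.2.1
    rcases Nat.exists_eq_add_of_lt hlt with ⟨k, hk⟩
    rw [show m.toNat = (PySem.Int.floordiv m p).toNat + k + 1 from hk, pvStripF, if_pos h,
      pvStripF_irrel ((PySem.Int.floordiv m p).toNat + k) (PySem.Int.floordiv m p).toNat
        (PySem.Int.floordiv m p) p (by omega) (by omega), if_pos h]
  · cases hm : m.toNat with
    | zero => rw [pvStripF, if_neg h]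
    | succ k => rw [pvStripF, if_neg h, if_neg h]

theorem pvStripF_fst_le : ∀ (f : Nat) (m p : Int), (pvStripF f m p).1 ≤ m := by
  intro f
  induction f with
  | zero => intro m p; rw [pvStripF]
  | succ f ih =>
    intro m p
    rw [pvStripF]
    by_cases h : 0 < m ∧ 1 < p ∧ PySem.Int.mod m p = 0
    · rw [if_pos h]
      have h1 := ih (PySem.Int.floordiv m p) p
      have h2 : PySem.Int.floordiv m p < m := by
        have := pvFloorLt m p h.1 h.2.1
        have h3 : 0 ≤ PySem.Int.floordiv m p := by
          rw [PySem.Int.floordiv_eq_ediv_of_pos (by omega)]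
          exact Int.ediv_nonneg (by omega) (by omega)
        omega
      simp only
      omega
    · rw [if_neg h]

theorem pvStrip_fst_le (m p : Int) : (pvStrip m p).1 ≤ m := pvStripF_fst_le m.toNat m p

theorem pvOddF_irrel :
    ∀ (f g : Nat) (n m p res : Int), (m + 2 - p).toNat ≤ f → (m + 2 - p).toNat ≤ g →
      pvOddF f n m p res = pvOddF g n m p res := by
  intro f
  induction f with
  | zero =>
    intro g n m p res hf _
    cases g with
    | zero => rfl
    | succ g => rw [pvOddF, pvOddF, if_neg (by
        rintro ⟨h1, h2⟩
        have hpm : p ≤ m := by nlinarith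
        omega)]
  | succ f ih =>
    intro g n m p res hf hg
    cases g with
    | zero =>
      rw [pvOddF, pvOddF, if_neg (by
        rintro ⟨h1, h2⟩
        have hpm : p ≤ m := by nlinarith
        omega)]
    | succ g =>
      rw [pvOddF, pvOddF]
      by_cases h : 2 ≤ p ∧ p * p ≤ m
      · rw [if_pos h, if_pos h]
        have hpm : p ≤ m := by nlinarith [h.1, h.2]
        by_cases hz : PySem.Int.mod m p = 0
        · rw [if_pos hz, if_pos hz]
          have hle := pvStrip_fst_le m p
          exact ih g n (pvStrip m p).1 (p + 2) _ (by omega) (by omega)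
        · rw [if_neg hz, if_neg hz]
          exact ih g n m (p + 2) res (by omega) (by omega)
      · rw [if_neg h, if_neg h]

theorem pvOdd_eq (n m p res : Int) :
    pvOdd n m p res =
      if 2 ≤ p ∧ p * p ≤ m then
        if PySem.Int.mod m p = 0 then
          pvOdd n (pvStrip m p).1 (p + 2) (res + (pvStrip m p).2 * PySem.Int.floordiv n p)
        else pvOdd n m (p + 2) res
      else (m, res) := by
  rw [pvOdd, pvOdd, pvOdd]
  by_cases h : 2 ≤ p ∧ p * p ≤ m
  · have hpm : p ≤ m := by nlinarith [h.1, h.2]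
    rcases Nat.exists_eq_add_of_le (show 1 ≤ (m + 2 - p).toNat by omega) with ⟨k, hk⟩
    rw [show (m + 2 - p).toNat = k + 1 by omega, pvOddF, if_pos h, if_pos h]
    have hle := pvStrip_fst_le m p
    by_cases hz : PySem.Int.mod m p = 0
    · rw [if_pos hz, if_pos hz]
      exact pvOddF_irrel k ((pvStrip m p).1 + 2 - (p + 2)).toNat n (pvStrip m p).1 (p + 2)
        (res + (pvStrip m p).2 * PySem.Int.floordiv n p) (by omega) (by omega)
    · rw [if_neg hz, if_neg hz]
      exact pvOddF_irrel k (m + 2 - (p + 2)).toNat n m (p + 2) res (by omega) (by omega)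
  · cases hm : (m + 2 - p).toNat with
    | zero => rw [pvOddF, if_neg h]
    | succ k => rw [pvOddF, if_neg h, if_neg h]

theorem pvSpfOddF_irrel :
    ∀ (f g : Nat) (n p : Int), (n + 2 - p).toNat ≤ f → (n + 2 - p).toNat ≤ g →
      pvSpfOddF f n p = pvSpfOddF g n p := by
  intro f
  induction f with
  | zero =>
    intro g n p hf _
    cases g with
    | zero => rfl
    | succ g => rw [pvSpfOddF, pvSpfOddF, if_neg (by
        rintro ⟨h1, h2, h3⟩
        have hpn : p ≤ n := by nlinarith
        omega)]
  | succ f ih =>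
    intro g n p hf hg
    cases g with
    | zero =>
      rw [pvSpfOddF, pvSpfOddF, if_neg (by
        rintro ⟨h1, h2, h3⟩
        have hpn : p ≤ n := by nlinarith
        omega)]
    | succ g =>
      rw [pvSpfOddF, pvSpfOddF]
      by_cases h : 2 ≤ p ∧ p * p ≤ n ∧ PySem.Int.mod n p ≠ 0
      · rw [if_pos h, if_pos h]
        have hpn : p ≤ n := by nlinarith [h.1, h.2.1]
        exact ih g n (p + 2) (by omega) (by omega)
      · rw [if_neg h, if_neg h]

theorem pvSpfOdd_eq (n p : Int) :
    pvSpfOdd n p =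
      if 2 ≤ p ∧ p * p ≤ n ∧ PySem.Int.mod n p ≠ 0 then pvSpfOdd n (p + 2) else p := by
  rw [pvSpfOdd, pvSpfOdd]
  by_cases h : 2 ≤ p ∧ p * p ≤ n ∧ PySem.Int.mod n p ≠ 0
  · have hpn : p ≤ n := by nlinarith [h.1, h.2.1]
    rcases Nat.exists_eq_add_of_le (show 1 ≤ (n + 2 - p).toNat by omega) with ⟨k, hk⟩
    rw [show (n + 2 - p).toNat = k + 1 by omega, pvSpfOddF, if_pos h, if_pos h]
    exact pvSpfOddF_irrel k (n + 2 - (p + 2)).toNat n (p + 2) (by omega) (by omega)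
  · cases hm : (n + 2 - p).toNat with
    | zero => rw [pvSpfOddF, if_neg h]
    | succ k => rw [pvSpfOddF, if_neg h, if_neg h]

theorem le_pvSpfOddF : ∀ (f : Nat) (n p : Int), p ≤ pvSpfOddF f n p := by
  intro f
  induction f with
  | zero => intro n p; rw [pvSpfOddF]
  | succ f ih =>
    intro n p
    rw [pvSpfOddF]
    by_cases h : 2 ≤ p ∧ p * p ≤ n ∧ PySem.Int.mod n p ≠ 0
    · rw [if_pos h]
      have := ih n (p + 2)
      omega
    · rw [if_neg h]

theorem le_pvSpfOdd (n p : Int) : p ≤ pvSpfOdd n p := le_pvSpfOddF _ n p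

theorem pvAltDec (n : Int) (h : ¬ n ≤ 1) :
    (PySem.Int.floordiv n (if PySem.Int.mod n 2 = 0 then 2
      else if n < pvSpfOdd n 3 * pvSpfOdd n 3 then n else pvSpfOdd n 3)).toNat < n.toNat := by
  apply pvFloorLt _ _ (by omega)
  have h3 : (3:Int) ≤ pvSpfOdd n 3 := le_pvSpfOdd n 3
  split_ifs <;> omega

theorem pvAltF_irrel :
    ∀ (f g : Nat) (n : Int), n.toNat ≤ f → n.toNat ≤ g → pvAltF f n = pvAltF g n := by
  intro f
  induction f with
  | zero =>
    intro g n hf _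
    cases g with
    | zero => rfl
    | succ g => rw [pvAltF, pvAltF, if_pos (by omega)]
  | succ f ih =>
    intro g n hf hg
    cases g with
    | zero => rw [pvAltF, pvAltF, if_pos (by omega)]
    | succ g =>
      rw [pvAltF, pvAltF]
      by_cases h : n ≤ 1
      · rw [if_pos h, if_pos h]
      · rw [if_neg h, if_neg h]
        have hlt := pvAltDec n h
        simp only
        rw [ih g _ (by omega) (by omega)]

theorem pvAlt_eq (n : Int) :
    arithmetic_derivative_alt n =
      if n ≤ 1 then 0
      else
        (PySem.Int.floordiv n (if PySem.Int.mod n 2 = 0 then 2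
            else if n < pvSpfOdd n 3 * pvSpfOdd n 3 then n else pvSpfOdd n 3))
          + (if PySem.Int.mod n 2 = 0 then (2:Int)
             else if n < pvSpfOdd n 3 * pvSpfOdd n 3 then n else pvSpfOdd n 3)
            * arithmetic_derivative_alt
                (PySem.Int.floordiv n (if PySem.Int.mod n 2 = 0 then 2
                  else if n < pvSpfOdd n 3 * pvSpfOdd n 3 then n else pvSpfOdd n 3)) := by
  rw [arithmetic_derivative_alt, arithmetic_derivative_alt]
  by_cases h : n ≤ 1
  · cases hm : n.toNat with
    | zero => rw [pvAltF, if_pos h]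
    | succ k => rw [pvAltF, if_pos h, if_pos h]
  · have hlt := pvAltDec n h
    rcases Nat.exists_eq_add_of_lt hlt with ⟨k, hk⟩
    rw [show n.toNat = _ + k + 1 from hk, pvAltF, if_neg h]
    simp only
    rw [pvAltF_irrel (_ + k) _ _ (by omega) (le_refl _), if_neg h]

-- unfolding of Mathlib's primeFactorsList one step
theorem pfl_cons (n : Nat) (h : 2 ≤ n) :
    n.primeFactorsList = n.minFac :: (n / n.minFac).primeFactorsList := by
  match n, h with
  | (k+2), _ => rw [Nat.primeFactorsList]

-- the summed contribution of a prime p stripped a times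
theorem sum_decomp (n : Int) (a p : Nat) (l : List Nat) :
    ((List.replicate a p ++ l).map (fun q : Nat => PySem.Int.floordiv n (q:Int))).sum
      = (a:Int) * PySem.Int.floordiv n (p:Int)
        + (l.map (fun q : Nat => PySem.Int.floordiv n (q:Int))).sum := by
  rw [List.map_append, List.sum_append, List.map_replicate, List.sum_replicate, nsmul_eq_mul]

-- A's bit-twiddling factor-2 loop is the generic strip loop at p = 2
theorem pvStrip2F_eq : ∀ (f : Nat) (m : Int), pvStrip2F f m = pvStripF f m 2 := by
  intro f
  induction f with
  | zero => intro m; rw [pvStrip2F, pvStripF]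
  | succ f ih =>
    intro m
    rw [pvStrip2F, pvStripF, PySem.Int.band_one]
    have hs : m >>> (1:Nat) = PySem.Int.floordiv m 2 := by
      rw [PySem.Int.floordiv_eq_ediv_of_pos (by omega)]
      simpa using Int.shiftRight_eq_div_pow m 1
    by_cases h : 0 < m ∧ PySem.Int.mod m 2 = 0
    · rw [if_pos h, if_pos ⟨h.1, by omega, h.2⟩, hs, ih]
    · rw [if_neg h, if_neg (by tauto)]

theorem pvStrip2_eq (m : Int) : pvStrip2 m = pvStrip m 2 := by
  rw [pvStrip2, pvStrip, pvStrip2F_eq]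

-- what the strip loop computes, at the smallest remaining prime factor
theorem pvStrip_spec :
    ∀ (M : Nat), 0 < M → ∀ (p : Nat), p.Prime →
      (∀ q ∈ M.primeFactorsList, p ≤ q) →
      ∃ (M' a : Nat), pvStrip (M:Int) (p:Int) = ((M':Int), (a:Int)) ∧
        M.primeFactorsList = List.replicate a p ++ M'.primeFactorsList ∧
        ¬ p ∣ M' ∧ 0 < M' ∧ M' ∣ M := by
  intro M
  induction M using Nat.strong_induction_on with
  | _ M ih =>
    intro hM p hp hmin
    by_cases hdvd : p ∣ M
    · have hp2 : 2 ≤ p := hp.two_le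
      have hM2 : 2 ≤ M := le_trans hp2 (Nat.le_of_dvd hM hdvd)
      have hMp_pos : 0 < M / p := Nat.div_pos (Nat.le_of_dvd hM hdvd) hp.pos
      have hMp_lt : M / p < M := Nat.div_lt_self hM hp.one_lt
      have hdd : M / p ∣ M := ⟨p, (Nat.div_mul_cancel hdvd).symm⟩
      have hmin' : ∀ q ∈ (M / p).primeFactorsList, p ≤ q := by
        intro q hq
        apply hmin
        rw [Nat.mem_primeFactorsList (by omega)] at hq ⊢
        exact ⟨hq.1, hq.2.trans hdd⟩
      obtain ⟨M', a, heq, hfac, hnd, hpos, hdvd'⟩ := ih (M / p) hMp_lt hMp_pos p hp hmin'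
      refine ⟨M', a + 1, ?_, ?_, hnd, hpos, hdvd'.trans hdd⟩
      · rw [pvStrip_eq, if_pos ⟨by exact_mod_cast hM, by exact_mod_cast hp.one_lt, by
          rw [PySem.Int.mod_natCast]
          exact_mod_cast congrArg (Nat.cast : Nat → Int) (Nat.dvd_iff_mod_eq_zero.mp hdvd)⟩]
        rw [PySem.Int.floordiv_natCast, heq]
        push_cast
        ring_nf
      · have hmf : M.minFac = p := by
          apply le_antisymm (Nat.minFac_le_of_dvd hp2 hdvd)
          apply hmin
          rw [Nat.mem_primeFactorsList (by omega)]
          exact ⟨Nat.minFac_prime (by omega), Nat.minFac_dvd M⟩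
        rw [pfl_cons M hM2, hmf, hfac, List.replicate_succ]
        simp
    · refine ⟨M, 0, ?_, by simp, hdvd, hM, dvd_rfl⟩
      rw [pvStrip_eq, if_neg]
      · norm_num
      · rintro ⟨-, -, hz⟩
        rw [PySem.Int.mod_natCast] at hz
        exact hdvd (Nat.dvd_iff_mod_eq_zero.mpr (by exact_mod_cast hz))

-- the odd loop plus A's trailing 'if m > 1' step sums n // q over the remaining prime factors
theorem pvOdd_spec :
    ∀ (k : Nat), ∀ (M p : Nat) (n res : Int),
      M + 2 ≤ k + p → 3 ≤ p → ¬ 2 ∣ p → 0 < M → ¬ 2 ∣ M →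
      (∀ q ∈ M.primeFactorsList, p ≤ q) →
      (if 1 < (pvOdd n (M:Int) (p:Int) res).1 then
         (pvOdd n (M:Int) (p:Int) res).2 + PySem.Int.floordiv n (pvOdd n (M:Int) (p:Int) res).1
       else (pvOdd n (M:Int) (p:Int) res).2)
        = res + ((M.primeFactorsList).map (fun q : Nat => PySem.Int.floordiv n (q:Int))).sum := by
  intro k
  induction k using Nat.strong_induction_on with
  | _ k ih =>
    intro M p n res hk hp3 hpodd hM hModd hmin
    by_cases hguard : p * p ≤ M
    · have hppM : p ≤ M := by nlinarith
      have hk8 : 2 ≤ k := by nlinarith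
      have hg : (2 ≤ (p:Int) ∧ (p:Int) * (p:Int) ≤ (M:Int)) :=
        ⟨by exact_mod_cast le_trans (by omega) hp3, by exact_mod_cast hguard⟩
      rw [pvOdd_eq, if_pos hg]
      by_cases hdvd : p ∣ M
      · have hmodz : PySem.Int.mod (M:Int) (p:Int) = 0 := by
          rw [PySem.Int.mod_natCast]
          exact_mod_cast congrArg (Nat.cast : Nat → Int) (Nat.dvd_iff_mod_eq_zero.mp hdvd)
        rw [if_pos hmodz]
        have hp_prime : p.Prime := by
          have h2 : p.minFac ∣ M := (Nat.minFac_dvd p).trans hdvd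
          have h3 : p.minFac ∈ M.primeFactorsList := by
            rw [Nat.mem_primeFactorsList (by omega)]
            exact ⟨Nat.minFac_prime (by omega), h2⟩
          have h4 := hmin _ h3
          have h5 := Nat.minFac_le (show 0 < p by omega)
          have h6 := Nat.minFac_prime (show p ≠ 1 by omega)
          rwa [le_antisymm h5 h4] at h6
        obtain ⟨M', a, heq, hfac, hnd, hpos, hdvd'⟩ := pvStrip_spec M hM p hp_prime hmin
        rw [heq]
        simp only
        have hcast : (p:Int) + 2 = ((p+2 : Nat):Int) := by push_cast; ring
        rw [hcast]
        have hM'le : M' ≤ M := Nat.le_of_dvd hM hdvd'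
        have hM'odd : ¬ 2 ∣ M' := fun h => hModd (h.trans hdvd')
        have hmin' : ∀ q ∈ M'.primeFactorsList, p + 2 ≤ q := by
          intro q hq
          rw [Nat.mem_primeFactorsList (by omega)] at hq
          have hqM : q ∈ M.primeFactorsList := by
            rw [Nat.mem_primeFactorsList (by omega)]
            exact ⟨hq.1, hq.2.trans hdvd'⟩
          have h1 := hmin _ hqM
          have hqp : q ≠ p := by rintro rfl; exact hnd hq.2
          have hq2 : ¬ 2 ∣ q := by
            intro h2
            exact hModd ((h2.trans hq.2).trans hdvd')
          omega
        rw [ih (k - 2) (by omega) M' (p+2) n (res + (a:Int) * PySem.Int.floordiv n (p:Int))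
              (by omega) (by omega) (by omega) hpos hM'odd hmin']
        rw [hfac, sum_decomp]
        ring
      · have hmodnz : ¬ PySem.Int.mod (M:Int) (p:Int) = 0 := by
          rw [PySem.Int.mod_natCast]
          intro hz
          exact hdvd (Nat.dvd_iff_mod_eq_zero.mpr (by exact_mod_cast hz))
        rw [if_neg hmodnz]
        have hcast : (p:Int) + 2 = ((p+2 : Nat):Int) := by push_cast; ring
        rw [hcast]
        have hmin' : ∀ q ∈ M.primeFactorsList, p + 2 ≤ q := by
          intro q hq
          have h1 := hmin _ hq
          rw [Nat.mem_primeFactorsList (by omega)] at hq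
          have hqp : q ≠ p := by rintro rfl; exact hdvd hq.2
          have hq2 : ¬ 2 ∣ q := fun h2 => hModd (h2.trans hq.2)
          omega
        exact ih (k - 2) (by omega) M (p+2) n res (by omega) (by omega) (by omega) hM hModd hmin'
    · have hg : ¬ (2 ≤ (p:Int) ∧ (p:Int) * (p:Int) ≤ (M:Int)) := by
        rintro ⟨-, hle⟩
        exact hguard (by exact_mod_cast hle)
      rw [pvOdd_eq, if_neg hg]
      by_cases hM1 : M = 1
      · subst hM1
        norm_num [Nat.primeFactorsList_one]
      · have hprime : M.Prime := by
          by_contra hnp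
          have h1 := Nat.minFac_sq_le_self (by omega) hnp
          have h2 : M.minFac ∈ M.primeFactorsList := by
            rw [Nat.mem_primeFactorsList (by omega)]
            exact ⟨Nat.minFac_prime hM1, Nat.minFac_dvd M⟩
          have h3 := hmin _ h2
          nlinarith [h1, h3, hguard]
        rw [Nat.primeFactorsList_prime hprime]
        have h1M : (1:Int) < (M:Int) := by exact_mod_cast hprime.two_le
        simp [h1M]

-- A computes the sum of n // q over the prime factors (with multiplicity)
theorem adA_eq (N : Nat) (h2 : 2 ≤ N) :
    arithmetic_derivative (N:Int)
      = ((N.primeFactorsList).map (fun q : Nat => PySem.Int.floordiv (N:Int) (q:Int))).sum := by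
  have hN1 : ¬ ((N:Int) ≤ 1) := by
    have : (1:Int) < (N:Int) := by exact_mod_cast h2
    omega
  rw [arithmetic_derivative, if_neg hN1]
  simp only
  have c2 : ((2:Nat):Int) = 2 := by norm_num
  have c3 : ((3:Nat):Int) = 3 := by norm_num
  by_cases hev : 2 ∣ N
  · have hband : PySem.Int.band (N:Int) 1 = 0 := by
      rw [PySem.Int.band_one, ← c2, PySem.Int.mod_natCast]
      exact_mod_cast congrArg (Nat.cast : Nat → Int) (Nat.dvd_iff_mod_eq_zero.mp hev)
    rw [if_pos hband]
    obtain ⟨M', a, heq, hfac, hnd, hpos, hdvd'⟩ := pvStrip_spec N (by omega) 2 Nat.prime_two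
      (fun q hq => (Nat.prime_of_mem_primeFactorsList hq).two_le)
    rw [pvStrip2_eq, ← c2, heq]
    simp only
    rw [← c3]
    have hmin3 : ∀ q ∈ M'.primeFactorsList, 3 ≤ q := by
      intro q hq
      rw [Nat.mem_primeFactorsList (by omega)] at hq
      have hq2 : 2 ≤ q := hq.1.two_le
      have hqne : q ≠ 2 := by rintro rfl; exact hnd hq.2
      omega
    rw [pvOdd_spec M' M' 3 (N:Int) (0 + (a:Int) * PySem.Int.floordiv (N:Int) ((2:Nat):Int))
          (by omega) (by norm_num) (by norm_num) hpos hnd hmin3]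
    rw [hfac, sum_decomp]
    ring
  · have hband : ¬ PySem.Int.band (N:Int) 1 = 0 := by
      rw [PySem.Int.band_one, ← c2, PySem.Int.mod_natCast]
      have : N % 2 = 1 := by omega
      rw [this]
      norm_num
    rw [if_neg hband]
    simp only
    rw [← c3]
    have hmin3 : ∀ q ∈ N.primeFactorsList, 3 ≤ q := by
      intro q hq
      rw [Nat.mem_primeFactorsList (by omega)] at hq
      have hq2 : 2 ≤ q := hq.1.two_le
      have hqne : q ≠ 2 := by rintro rfl; exact hev hq.2
      omega
    rw [pvOdd_spec N N 3 (N:Int) 0 (by omega) (by norm_num) (by norm_num) (by omega) hev hmin3]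
    ring

-- B's trial-division scan finds the smallest prime factor
theorem spf_spec :
    ∀ (j : Nat), ∀ (N k : Nat), N + 2 ≤ j + k → 2 ≤ N → ¬ 2 ∣ N → 3 ≤ k → ¬ 2 ∣ k →
      (∀ q ∈ N.primeFactorsList, k ≤ q) →
      ∃ p : Nat,
        (if (N:Int) < pvSpfOdd (N:Int) (k:Int) * pvSpfOdd (N:Int) (k:Int) then (N:Int)
         else pvSpfOdd (N:Int) (k:Int)) = (p:Int) ∧
        p.Prime ∧ p ∣ N ∧ ∀ q ∈ N.primeFactorsList, p ≤ q := by
  intro j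
  induction j using Nat.strong_induction_on with
  | _ j ih =>
    intro N k hj hN2 hNodd hk3 hkodd hmin
    by_cases hg1 : k * k ≤ N
    · by_cases hdvd : k ∣ N
      · have hmodz : PySem.Int.mod (N:Int) (k:Int) = 0 := by
          rw [PySem.Int.mod_natCast]
          exact_mod_cast congrArg (Nat.cast : Nat → Int) (Nat.dvd_iff_mod_eq_zero.mp hdvd)
        have hng : ¬ (2 ≤ (k:Int) ∧ (k:Int) * (k:Int) ≤ (N:Int) ∧ PySem.Int.mod (N:Int) (k:Int) ≠ 0) := by
          rintro ⟨-, -, h⟩; exact h hmodz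
        rw [pvSpfOdd_eq, if_neg hng]
        rw [if_neg (show ¬ ((N:Int) < (k:Int) * (k:Int)) by exact_mod_cast not_lt.mpr hg1)]
        have hkp : k.Prime := by
          have h2 : k.minFac ∣ N := (Nat.minFac_dvd k).trans hdvd
          have h3 : k.minFac ∈ N.primeFactorsList := by
            rw [Nat.mem_primeFactorsList (by omega)]
            exact ⟨Nat.minFac_prime (by omega), h2⟩
          have h4 := hmin _ h3
          have h5 := Nat.minFac_le (show 0 < k by omega)
          have h6 := Nat.minFac_prime (show k ≠ 1 by omega)
          rwa [le_antisymm h5 h4] at h6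
        exact ⟨k, rfl, hkp, hdvd, hmin⟩
      · have hmodnz : PySem.Int.mod (N:Int) (k:Int) ≠ 0 := by
          rw [PySem.Int.mod_natCast]
          intro hz
          exact hdvd (Nat.dvd_iff_mod_eq_zero.mpr (by exact_mod_cast hz))
        have hgp : (2 ≤ (k:Int) ∧ (k:Int) * (k:Int) ≤ (N:Int) ∧ PySem.Int.mod (N:Int) (k:Int) ≠ 0) :=
          ⟨by exact_mod_cast (show 2 ≤ k by omega), by exact_mod_cast hg1, hmodnz⟩
        rw [pvSpfOdd_eq, if_pos hgp]
        rw [show ((k:Int) + 2) = ((k + 2 : Nat):Int) by push_cast; ring]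
        have hkN : 3 * k ≤ k * k := by nlinarith
        have hmin' : ∀ q ∈ N.primeFactorsList, k + 2 ≤ q := by
          intro q hq
          have h1 := hmin _ hq
          rw [Nat.mem_primeFactorsList (by omega)] at hq
          have hqk : q ≠ k := by rintro rfl; exact hdvd hq.2
          have hq2 : ¬ 2 ∣ q := fun h2 => hNodd (h2.trans hq.2)
          omega
        exact ih (j - 2) (by omega) N (k + 2) (by omega) hN2 hNodd (by omega) (by omega) hmin'
    · have hng : ¬ (2 ≤ (k:Int) ∧ (k:Int) * (k:Int) ≤ (N:Int) ∧ PySem.Int.mod (N:Int) (k:Int) ≠ 0) := by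
        rintro ⟨-, h, -⟩; exact hg1 (by exact_mod_cast h)
      rw [pvSpfOdd_eq, if_neg hng]
      rw [if_pos (show (N:Int) < (k:Int) * (k:Int) by exact_mod_cast not_le.mp hg1)]
      have hprime : N.Prime := by
        by_contra hnp
        have h1 := Nat.minFac_sq_le_self (by omega) hnp
        have hmem : N.minFac ∈ N.primeFactorsList := by
          rw [Nat.mem_primeFactorsList (by omega)]
          exact ⟨Nat.minFac_prime (by omega), Nat.minFac_dvd N⟩
        have h3 := hmin _ hmem
        nlinarith [h1, h3]
      refine ⟨N, rfl, hprime, dvd_rfl, ?_⟩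
      intro q hq
      rw [Nat.primeFactorsList_prime hprime] at hq
      simp at hq
      omega

-- B computes the same sum, by the Leibniz rule
theorem adB_eq (N : Nat) :
    arithmetic_derivative_alt (N:Int)
      = ((N.primeFactorsList).map (fun q : Nat => PySem.Int.floordiv (N:Int) (q:Int))).sum := by
  induction N using Nat.strong_induction_on with
  | _ N ih =>
    by_cases hN1 : N ≤ 1
    · have hle : (N:Int) ≤ 1 := by exact_mod_cast hN1
      rw [pvAlt_eq, if_pos hle]
      have hnil : N.primeFactorsList = [] := by
        interval_cases N
        · exact Nat.primeFactorsList_zero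
        · exact Nat.primeFactorsList_one
      rw [hnil]
      simp
    · have hN2 : 2 ≤ N := by omega
      have hgt : ¬ ((N:Int) ≤ 1) := by
        have : (1:Int) < (N:Int) := by exact_mod_cast hN2
        omega
      rw [pvAlt_eq, if_neg hgt]
      have hex : ∃ p : Nat,
          (if PySem.Int.mod (N:Int) 2 = 0 then (2:Int)
           else if (N:Int) < pvSpfOdd (N:Int) 3 * pvSpfOdd (N:Int) 3 then (N:Int)
                else pvSpfOdd (N:Int) 3) = (p:Int) ∧
          p.Prime ∧ p ∣ N ∧ ∀ q ∈ N.primeFactorsList, p ≤ q := by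
        by_cases hev : 2 ∣ N
        · have hmodz : PySem.Int.mod (N:Int) 2 = 0 := by
            rw [show (2:Int) = ((2:Nat):Int) by norm_num, PySem.Int.mod_natCast]
            exact_mod_cast congrArg (Nat.cast : Nat → Int) (Nat.dvd_iff_mod_eq_zero.mp hev)
          exact ⟨2, by rw [if_pos hmodz]; norm_num, Nat.prime_two, hev,
            fun q hq => (Nat.prime_of_mem_primeFactorsList hq).two_le⟩
        · have hmodnz : ¬ PySem.Int.mod (N:Int) 2 = 0 := by
            rw [show (2:Int) = ((2:Nat):Int) by norm_num, PySem.Int.mod_natCast]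
            have : N % 2 = 1 := by omega
            rw [this]
            norm_num
          have hmin3 : ∀ q ∈ N.primeFactorsList, 3 ≤ q := by
            intro q hq
            rw [Nat.mem_primeFactorsList (by omega)] at hq
            have hq2 : 2 ≤ q := hq.1.two_le
            have hqne : q ≠ 2 := by rintro rfl; exact hev hq.2
            omega
          obtain ⟨p, hpe, hpp, hpd, hpm⟩ :=
            spf_spec N N 3 (by omega) hN2 hev (by norm_num) (by omega) hmin3
          refine ⟨p, ?_, hpp, hpd, hpm⟩
          rw [if_neg hmodnz]
          rw [show ((3:Nat):Int) = (3:Int) by norm_num] at hpe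
          exact hpe
      obtain ⟨p, hpe, hpp, hpd, hpm⟩ := hex
      rw [hpe, PySem.Int.floordiv_natCast]
      have hmf : N.minFac = p := by
        apply le_antisymm (Nat.minFac_le_of_dvd hpp.two_le hpd)
        apply hpm
        rw [Nat.mem_primeFactorsList (by omega)]
        exact ⟨Nat.minFac_prime (by omega), Nat.minFac_dvd N⟩
      have hNp_lt : N / p < N := Nat.div_lt_self (by omega) hpp.one_lt
      rw [ih (N / p) hNp_lt]
      rw [pfl_cons N (by omega), hmf]
      simp only [List.map_cons, List.sum_cons, PySem.Int.floordiv_natCast]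
      have hsum : (p:Int) * ((N / p).primeFactorsList.map
            (fun q : Nat => ((N / p / q : Nat):Int))).sum
          = ((N / p).primeFactorsList.map (fun q : Nat => ((N / q : Nat):Int))).sum := by
        rw [← List.sum_map_mul_left]
        apply congrArg List.sum
        apply List.map_congr_left
        intro q hq
        have hqd : q ∣ N / p := Nat.dvd_of_mem_primeFactorsList hq
        have hnat : p * (N / p / q) = N / q := by
          rw [← Nat.mul_div_assoc p hqd, Nat.mul_div_cancel' hpd]
        exact_mod_cast congrArg (Nat.cast : Nat → Int) hnat
      rw [hsum]

-- ===== VERDICT (by name: the statement is the Claim_ definition above) =====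
theorem arithmetic_derivative_spec : Claim_equal_arithmetic_derivative := by
  intro n _
  unfold Spec_arithmetic_derivative
  by_cases hn : n ≤ 1
  · rw [arithmetic_derivative, pvAlt_eq, if_pos hn, if_pos hn]
  · have hN : n = ((n.toNat : Nat) : Int) := by omega
    rw [hN, adA_eq n.toNat (by omega), adB_eq n.toNat]
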